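-- pv_equiv track=rewrite | github.com/msunnnnn/AoC2022 | day1.py | calories_sorted
-- ===== SOURCE A (Python) =====
-- def calories_sorted(input):
--     calories_list = []
--     elf = 1
--     calories = 0
--
--     for i in input:
--         if i == 0:
--             calories_list.append(calories)
--             elf += 1
--             calories = 0
--         else:
--             calories += i
--
--     calories_list.sort(reverse=True)
--     return calories_list
-- ===== SOURCE B (Python) =====
-- def calories_sorted(input):
--     sums = []
--     rest = input
--     while 0 in rest:
--         k = rest.index(0)
--         sums.append(sum(rest[:k]))
--         rest = rest[k + 1:]
--     return sorted(sums, reverse=True)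
-- ===== Notes on version B (the rewrite author's own statement) =====
-- stated objective: alternative
-- what changed: Replaces A's single accumulator scan (running sum reset at each 0, appended on the fly) with a find-first-zero/slice-sum/cut loop: repeatedly locate the next 0 with list.index, sum the slice before it with sum(), and continue on the remainder, so the trailing unclosed group is dropped just as in A; then sort descending.
import Mathlib
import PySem

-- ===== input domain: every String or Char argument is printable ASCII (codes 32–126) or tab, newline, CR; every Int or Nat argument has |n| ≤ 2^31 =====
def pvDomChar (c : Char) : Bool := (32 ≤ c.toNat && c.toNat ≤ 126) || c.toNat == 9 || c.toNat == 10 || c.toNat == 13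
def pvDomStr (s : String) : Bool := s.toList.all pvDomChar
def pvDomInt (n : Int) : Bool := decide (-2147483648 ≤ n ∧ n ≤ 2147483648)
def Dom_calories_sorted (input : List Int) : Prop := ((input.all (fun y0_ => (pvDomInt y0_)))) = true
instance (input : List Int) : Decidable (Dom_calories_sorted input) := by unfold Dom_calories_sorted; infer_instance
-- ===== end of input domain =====

-- B replaces the accumulator scan with a repeated find-first-zero / slice-sum / cut decomposition (alternative decomposition, same asymptotics).

-- ===== PORT A =====
-- state: (calories_list, elf, calories); the trailing group after the last 0 is never appended
def calStep (s : List Int × Int × Int) (i : Int) : List Int × Int × Int :=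
  if i == 0 then (s.1 ++ [s.2.2], s.2.1 + 1, 0)
  else (s.1, s.2.1, s.2.2 + i)

def calories_sorted (input : List Int) : List Int :=
  let st := input.foldl calStep ([], 1, 0)
  PySem.List.sorted st.1 (fun x => x) true

-- ===== PORT B =====
-- the while loop of Source B: while 0 in rest: k = rest.index(0); sums.append(sum(rest[:k])); rest = rest[k+1:]
def calsAltGo (sums : List Int) (rest : List Int) : List Int :=
  match h : PySem.List.index? rest (0 : Int) with
  | some k =>
      calsAltGo (sums ++ [(PySem.List.slice rest none (some (k : Int))).sum])
        (PySem.List.slice rest (some ((k : Int) + 1)) none)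
  | none => sums
termination_by rest.length
decreasing_by
  obtain ⟨hk, _, _⟩ := PySem.List.getElem_of_index?_eq_some h
  have : ((k : Int) + 1) = (((k + 1 : Nat) : Int)) := by push_cast; ring
  rw [this, PySem.List.slice_from_natCast]
  simp [List.length_drop]; omega

def calories_sorted_alt (input : List Int) : List Int :=
  PySem.List.sorted (calsAltGo [] input) (fun x => x) true

-- ===== PRECONDITION & SPEC =====
def Spec_calories_sorted (input : List Int) (out : List Int) : Prop := out = calories_sorted_alt input
instance (input : List Int) (out : List Int) : Decidable (Spec_calories_sorted input out) := by unfold Spec_calories_sorted; infer_instance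

-- ===== CLAIM (what is proved, stated in full; the proofs are below) =====
def Claim_equal_calories_sorted : Prop := ∀ (input : List Int), Dom_calories_sorted input → Spec_calories_sorted input (calories_sorted input)

-- ===== LEMMAS AND PROOFS =====

-- the list of closed-group sums, the common characterisation of both ports
def calSegs (c : Int) : List Int → List Int
  | [] => []
  | x :: t => if x = 0 then c :: calSegs 0 t else calSegs (c + x) t

theorem calSegs_no_zero : ∀ (xs : List Int) (c : Int), (0 : Int) ∉ xs → calSegs c xs = [] := by
  intro xs
  induction xs with
  | nil => intro c _; rfl
  | cons x t ih =>
      intro c h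
      simp only [List.mem_cons, not_or] at h
      have hx : x ≠ 0 := fun hh => h.1 hh.symm
      simp [calSegs, hx, ih _ h.2]

theorem calSegs_append_zero : ∀ (pre : List Int) (suf : List Int) (c : Int), (0 : Int) ∉ pre →
    calSegs c (pre ++ 0 :: suf) = (c + pre.sum) :: calSegs 0 suf := by
  intro pre
  induction pre with
  | nil => intro suf c _; simp [calSegs]
  | cons x t ih =>
      intro suf c h
      simp only [List.mem_cons, not_or] at h
      have hx : x ≠ 0 := fun hh => h.1 hh.symm
      simp only [List.cons_append, calSegs, if_neg hx]
      rw [ih _ _ h.2]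
      simp [add_assoc]

theorem calsFold_eq (xs : List Int) (L : List Int) (e c : Int) :
    (xs.foldl calStep (L, e, c)).1 = L ++ calSegs c xs := by
  induction xs generalizing L e c with
  | nil => simp [calSegs]
  | cons x t ih =>
      rw [List.foldl_cons]
      by_cases hx : x = 0
      · have hstep : calStep (L, e, c) x = (L ++ [c], e + 1, 0) := by simp [calStep, hx]
        rw [hstep, ih]; simp [calSegs, hx]
      · have hstep : calStep (L, e, c) x = (L, e, c + x) := by simp [calStep, hx]
        rw [hstep, ih]; simp [calSegs, hx]

theorem calsAltGo_eq (xs : List Int) (S : List Int) :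
    calsAltGo S xs = S ++ calSegs 0 xs := by
  induction hn : xs.length using Nat.strong_induction_on generalizing xs S with
  | _ n ih =>
    rw [calsAltGo]
    split
    · next k h =>
        obtain ⟨pre, suf, hxs, hlen, hnot⟩ := (PySem.List.index?_eq_some_iff xs 0 k).mp h
        subst hxs
        have hslice1 : PySem.List.slice (pre ++ 0 :: suf) none (some (k : Int)) = pre := by
          rw [PySem.List.slice_to_natCast, ← hlen, List.take_left]
        have hcast : ((k : Int) + 1) = (((k + 1 : Nat) : Int)) := by push_cast; ring
        have hslice2 : PySem.List.slice (pre ++ 0 :: suf) (some ((k : Int) + 1)) none = suf := by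
          rw [hcast, PySem.List.slice_from_natCast,
            show pre ++ 0 :: suf = (pre ++ [(0 : Int)]) ++ suf by simp,
            show k + 1 = (pre ++ [(0 : Int)]).length by simp [hlen], List.drop_left]
        rw [hslice1, hslice2, calSegs_append_zero pre suf 0 hnot]
        rw [ih suf.length (by subst hn; simp; omega) suf _ rfl]
        simp
    · next h =>
        rw [calSegs_no_zero xs 0 ((PySem.List.index?_eq_none_iff xs 0).mp h)]
        simp

-- ===== VERDICT (by name: the statement is the Claim_ definition above) =====
theorem calories_sorted_spec : Claim_equal_calories_sorted := by
  intro input _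
  show PySem.List.sorted (List.foldl calStep ([], 1, 0) input).1 (fun x => x) true =
    PySem.List.sorted (calsAltGo [] input) (fun x => x) true
  rw [calsFold_eq, calsAltGo_eq]
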